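-- pv_equiv track=rewrite | github.com/dmendelsohn/advent_of_code | python/src/year2018/day17/day17.py | count_reached
-- ===== SOURCE A (Python) =====
-- def count_reached(cells):
--     wall_y_vals = {key[1] for key in cells if cells[key] == '#'}
--     miny = min(wall_y_vals)
--     maxy = max(wall_y_vals)
--     reached = 0
--     for key, value in cells.items():
--         if miny <= key[1] <= maxy and value in ('~', '|', '+'):
--             reached += 1
--     return reached
-- ===== SOURCE B (Python) =====
-- def _lower(a, x):
--     # first index i with a[i] >= x, binary search on the sorted list a
--     lo, hi = 0, len(a)
--     while lo < hi:
--         mid = (lo + hi) // 2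
--         if a[mid] < x:
--             lo = mid + 1
--         else:
--             hi = mid
--     return lo
--
--
-- def _upper(a, x):
--     # first index i with a[i] > x, binary search on the sorted list a
--     lo, hi = 0, len(a)
--     while lo < hi:
--         mid = (lo + hi) // 2
--         if a[mid] <= x:
--             lo = mid + 1
--         else:
--             hi = mid
--     return lo
--
--
-- def count_reached(cells):
--     # sort-then-binary-search: order the water-cell y's, take the wall range from the
--     # ends of the sorted wall y's, and count by subtracting two binary-search ranks
--     wall_ys = sorted({key[1] for key in cells if cells[key] == '#'})
--     miny, maxy = wall_ys[0], wall_ys[-1]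
--     water_ys = sorted(key[1] for key, value in cells.items()
--                       if value in ('~', '|', '+'))
--     return _upper(water_ys, maxy) - _lower(water_ys, miny)
-- ===== Notes on version B (the rewrite author's own statement) =====
-- stated objective: alternative
-- what changed: Replaces A's linear counting scan with a sort-and-rank algorithm: the water-cell y's are sorted and the answer is the difference of two hand-written binary-search ranks (first index > maxy minus first index >= miny), with miny/maxy read off the ends of the sorted wall y's instead of min()/max().
import Mathlib
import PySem

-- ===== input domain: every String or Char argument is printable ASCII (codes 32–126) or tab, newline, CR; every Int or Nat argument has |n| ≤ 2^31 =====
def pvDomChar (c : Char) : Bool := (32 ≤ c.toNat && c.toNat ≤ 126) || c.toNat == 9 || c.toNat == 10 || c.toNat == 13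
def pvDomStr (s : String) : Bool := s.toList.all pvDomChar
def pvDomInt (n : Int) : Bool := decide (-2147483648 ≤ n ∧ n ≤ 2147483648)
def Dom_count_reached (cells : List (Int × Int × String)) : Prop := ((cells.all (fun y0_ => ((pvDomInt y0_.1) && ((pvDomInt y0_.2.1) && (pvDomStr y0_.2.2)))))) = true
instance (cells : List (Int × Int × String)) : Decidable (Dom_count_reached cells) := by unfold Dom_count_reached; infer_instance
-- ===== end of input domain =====

-- B replaces A's linear counting scan by sort-and-rank: sort the water-cell y's and subtract two
-- hand-written binary-search ranks, reading miny/maxy off the ends of the sorted wall y's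
-- (objective: alternative algorithm, same task; equivalence of the RETURN value is proved below).


-- ===== PORT A =====
def count_reached (cells : List (Int × Int × String)) : Int :=
  -- the dict argument: association pairs ((x, y), value) folded into a Python dict (last value wins, first position kept)
  let d := PySem.Dict.ofList (cells.map (fun t => ((t.1, t.2.1), t.2.2)))
  -- wall_y_vals = {key[1] for key in cells if cells[key] == '#'}  (lookup of a dict's own key = its value)
  let wall_y_vals : PySem.Set Int :=
    PySem.Set.ofList ((d.items.filter (fun p => p.2 == "#")).map (fun p => p.1.2))
  match PySem.List.min? wall_y_vals (fun y => y), PySem.List.max? wall_y_vals (fun y => y) with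
  | some miny, some maxy =>
      -- for key, value in cells.items(): if miny <= key[1] <= maxy and value in ('~','|','+'): reached += 1
      d.items.foldl (fun reached p =>
        if (miny ≤ p.1.2 && p.1.2 ≤ maxy) && (p.2 == "~" || p.2 == "|" || p.2 == "+")
        then reached + 1 else reached) 0
  | _, _ => 0  -- unreachable under Pre_ (Python raises ValueError: min of an empty set)

-- ===== PORT B =====
-- _lower(a, x): binary-search while-loop; returns the first index i with a[i] >= x.
-- Ported as fuel-counted structural recursion (fuel = list length bounds the iteration count,
-- since the interval hi - lo shrinks every step; the fuel never runs out on the calls made).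
def pvLowerLoop (a : List Int) (x : Int) (fuel : Nat) (lo hi : Int) : Int :=
  match fuel with
  | 0 => lo
  | Nat.succ f =>
    if lo < hi then
      let mid := PySem.Int.floordiv (lo + hi) 2
      match PySem.List.pyGet? a mid with
      | none => lo  -- unreachable guard: 0 ≤ lo ≤ mid < hi ≤ len a at every call
      | some v => if v < x then pvLowerLoop a x f (mid + 1) hi else pvLowerLoop a x f lo mid
    else lo

def pvLower (a : List Int) (x : Int) : Int := pvLowerLoop a x a.length 0 (a.length : Int)

-- _upper(a, x): binary-search while-loop; returns the first index i with a[i] > x.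
def pvUpperLoop (a : List Int) (x : Int) (fuel : Nat) (lo hi : Int) : Int :=
  match fuel with
  | 0 => lo
  | Nat.succ f =>
    if lo < hi then
      let mid := PySem.Int.floordiv (lo + hi) 2
      match PySem.List.pyGet? a mid with
      | none => lo  -- unreachable guard: 0 ≤ lo ≤ mid < hi ≤ len a at every call
      | some v => if v ≤ x then pvUpperLoop a x f (mid + 1) hi else pvUpperLoop a x f lo mid
    else lo

def pvUpper (a : List Int) (x : Int) : Int := pvUpperLoop a x a.length 0 (a.length : Int)

def count_reached_alt (cells : List (Int × Int × String)) : Int :=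
  -- the dict argument, rebuilt exactly as Python receives it
  let d := PySem.Dict.ofList (cells.map (fun t => ((t.1, t.2.1), t.2.2)))
  -- wall_ys = sorted({key[1] for key in cells if cells[key] == '#'})
  let wall_ys : List Int :=
    PySem.List.sorted
      (PySem.Set.ofList ((d.items.filter (fun p => p.2 == "#")).map (fun p => p.1.2)))
      (fun y => y)
  -- miny, maxy = wall_ys[0], wall_ys[-1]  (IndexError on empty → none; unreachable under Pre_)
  match PySem.List.pyGet? wall_ys 0 with
  | none => 0  -- unreachable under Pre_ (Python raises IndexError)
  | some miny =>
    match PySem.List.pyGet? wall_ys (-1) with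
    | none => 0  -- unreachable under Pre_ (Python raises IndexError)
    | some maxy =>
      -- water_ys = sorted(key[1] for key, value in cells.items() if value in ('~','|','+'))
      let water_ys : List Int :=
        PySem.List.sorted
          ((d.items.filter (fun p => p.2 == "~" || p.2 == "|" || p.2 == "+")).map (fun p => p.1.2))
          (fun y => y)
      -- return _upper(water_ys, maxy) - _lower(water_ys, miny)
      pvUpper water_ys maxy - pvLower water_ys miny

-- ===== PRECONDITION & SPEC =====
-- Pre_ excludes exactly the inputs where Python raises: dicts with no '#' cell
-- (A: ValueError from min() of an empty set; B: IndexError from wall_ys[0]).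
def Pre_count_reached (cells : List (Int × Int × String)) : Prop :=
  "#" ∈ (PySem.Dict.ofList (cells.map (fun t => ((t.1, t.2.1), t.2.2)))).values
instance (cells : List (Int × Int × String)) : Decidable (Pre_count_reached cells) := by unfold Pre_count_reached; infer_instance

def pvWitness_count_reached : (List (Int × Int × String)) := [(0, 0, "#"), (1, 0, "~")]

def Spec_count_reached (cells : List (Int × Int × String)) (out : Int) : Prop := out = count_reached_alt cells
instance (cells : List (Int × Int × String)) (out : Int) : Decidable (Spec_count_reached cells out) := by unfold Spec_count_reached; infer_instance

-- ===== CLAIM (what is proved, stated in full; the proofs are below) =====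
def Claim_equal_count_reached : Prop := ∀ (cells : List (Int × Int × String)), Dom_count_reached cells → Pre_count_reached cells → Spec_count_reached cells (count_reached cells)

-- ===== LEMMAS AND PROOFS =====

-- elements at all indices ≤ m satisfy p → at least m+1 elements satisfy p
theorem countP_ge_of_prefix {a : List Int} {p : Int → Bool} {m : Nat} (hm : m < a.length)
    (h : ∀ j (_ : j < a.length), j ≤ m → p a[j] = true) : m + 1 ≤ a.countP p := by
  have hsplit : a.countP p = (a.take (m+1)).countP p + (a.drop (m+1)).countP p := by
    rw [← List.countP_append, List.take_append_drop]
  have hlen : (a.take (m+1)).length = m + 1 := by simp; omega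
  have hall : (a.take (m+1)).countP p = (a.take (m+1)).length := by
    rw [List.countP_eq_length]
    intro y hy
    rcases List.mem_iff_getElem.1 hy with ⟨i, hi, rfl⟩
    rw [List.getElem_take]
    exact h i (by omega) (by omega)
  omega

-- elements at all indices ≥ m fail p → at most m elements satisfy p
theorem countP_le_of_suffix {a : List Int} {p : Int → Bool} {m : Nat}
    (h : ∀ j (_ : j < a.length), m ≤ j → p a[j] = false) : a.countP p ≤ m := by
  have hsplit : a.countP p = (a.take m).countP p + (a.drop m).countP p := by
    rw [← List.countP_append, List.take_append_drop]
  have hzero : (a.drop m).countP p = 0 := by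
    rw [List.countP_eq_zero]
    intro y hy
    rcases List.mem_iff_getElem.1 hy with ⟨i, hi, rfl⟩
    rw [List.getElem_drop]
    simp only [List.length_drop] at hi
    simp [h (m + i) (by omega) (by omega)]
  have := List.countP_le_length (p := p) (l := a.take m)
  simp at this
  omega

theorem pvLowerLoop_eq (a : List Int) (x : Int) (fuel : Nat) (lo hi : Int)
    (hs : a.Pairwise (· ≤ ·)) (h0 : 0 ≤ lo) (hh : hi ≤ (a.length : Int))
    (hf : hi - lo ≤ (fuel : Int))
    (hlc : lo ≤ (a.countP (fun y => decide (y < x)) : Int))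
    (hch : (a.countP (fun y => decide (y < x)) : Int) ≤ hi) :
    pvLowerLoop a x fuel lo hi = (a.countP (fun y => decide (y < x)) : Int) := by
  induction fuel generalizing lo hi with
  | zero => simp only [pvLowerLoop]; omega
  | succ f ih =>
    rw [pvLowerLoop]
    split_ifs with hlh
    · have h1 := PySem.Int.floordiv_two_mid_bounds (le_of_lt hlh)
      have h2 := (PySem.Int.floordiv_lt_iff_lt_mul (a := lo + hi) (b := 2) (q := hi) (by norm_num)).2 (by omega)
      set mid := PySem.Int.floordiv (lo + hi) 2 with hmid
      have hmlt : mid.toNat < a.length := by omega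
      have hget : PySem.List.pyGet? a mid = some (a[mid.toNat]'hmlt) := by
        unfold PySem.List.pyGet? PySem.List.pyIdx?
        rw [if_pos (by omega), if_pos (by omega)]
        simp [List.getElem?_eq_getElem hmlt]
      simp only [hget]
      split_ifs with hvx
      · have hcount : mid.toNat + 1 ≤ a.countP (fun y => decide (y < x)) := by
          apply countP_ge_of_prefix hmlt
          intro j hj hjm
          have hle : a[j] ≤ a[mid.toNat] := by
            rcases lt_or_eq_of_le hjm with hlt | heq
            · exact List.pairwise_iff_getElem.1 hs j mid.toNat hj hmlt hlt
            · exact le_of_eq (by congr)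
          have : a[j] < x := lt_of_le_of_lt hle hvx
          simp [this]
        exact ih (mid + 1) hi (by omega) hh (by omega) (by omega) hch
      · have hcount : a.countP (fun y => decide (y < x)) ≤ mid.toNat := by
          apply countP_le_of_suffix
          intro j hj hjm
          have hge : a[mid.toNat] ≤ a[j] := by
            rcases lt_or_eq_of_le hjm with hlt | heq
            · exact List.pairwise_iff_getElem.1 hs mid.toNat j hmlt hj hlt
            · exact le_of_eq (by congr)
          have : ¬ a[j] < x := fun hl => hvx (lt_of_le_of_lt hge hl)
          simp [this]
        exact ih lo mid h0 (by omega) (by omega) hlc (by omega)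
    · omega

theorem pvUpperLoop_eq (a : List Int) (x : Int) (fuel : Nat) (lo hi : Int)
    (hs : a.Pairwise (· ≤ ·)) (h0 : 0 ≤ lo) (hh : hi ≤ (a.length : Int))
    (hf : hi - lo ≤ (fuel : Int))
    (hlc : lo ≤ (a.countP (fun y => decide (y ≤ x)) : Int))
    (hch : (a.countP (fun y => decide (y ≤ x)) : Int) ≤ hi) :
    pvUpperLoop a x fuel lo hi = (a.countP (fun y => decide (y ≤ x)) : Int) := by
  induction fuel generalizing lo hi with
  | zero => simp only [pvUpperLoop]; omega
  | succ f ih =>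
    rw [pvUpperLoop]
    split_ifs with hlh
    · have h1 := PySem.Int.floordiv_two_mid_bounds (le_of_lt hlh)
      have h2 := (PySem.Int.floordiv_lt_iff_lt_mul (a := lo + hi) (b := 2) (q := hi) (by norm_num)).2 (by omega)
      set mid := PySem.Int.floordiv (lo + hi) 2 with hmid
      have hmlt : mid.toNat < a.length := by omega
      have hget : PySem.List.pyGet? a mid = some (a[mid.toNat]'hmlt) := by
        unfold PySem.List.pyGet? PySem.List.pyIdx?
        rw [if_pos (by omega), if_pos (by omega)]
        simp [List.getElem?_eq_getElem hmlt]
      simp only [hget]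
      split_ifs with hvx
      · have hcount : mid.toNat + 1 ≤ a.countP (fun y => decide (y ≤ x)) := by
          apply countP_ge_of_prefix hmlt
          intro j hj hjm
          have hle : a[j] ≤ a[mid.toNat] := by
            rcases lt_or_eq_of_le hjm with hlt | heq
            · exact List.pairwise_iff_getElem.1 hs j mid.toNat hj hmlt hlt
            · exact le_of_eq (by congr)
          have : a[j] ≤ x := le_trans hle hvx
          simp [this]
        exact ih (mid + 1) hi (by omega) hh (by omega) (by omega) hch
      · have hcount : a.countP (fun y => decide (y ≤ x)) ≤ mid.toNat := by
          apply countP_le_of_suffix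
          intro j hj hjm
          have hge : a[mid.toNat] ≤ a[j] := by
            rcases lt_or_eq_of_le hjm with hlt | heq
            · exact List.pairwise_iff_getElem.1 hs mid.toNat j hmlt hj hlt
            · exact le_of_eq (by congr)
          have : ¬ a[j] ≤ x := fun hl => hvx (le_trans hge hl)
          simp [this]
        exact ih lo mid h0 (by omega) (by omega) hlc (by omega)
    · omega

theorem countP_range_split (l : List Int) (m M : Int) (h : m ≤ M) :
    l.countP (fun y => decide (y ≤ M))
      = l.countP (fun y => decide (y < m)) + l.countP (fun y => m ≤ y && y ≤ M) := by
  induction l with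
  | nil => simp
  | cons z t ih =>
    simp only [List.countP_cons, ih]
    by_cases h1 : z ≤ M <;> by_cases h2 : z < m <;> by_cases h3 : m ≤ z <;>
      simp [h1, h2, h3] <;> omega


-- sorted-list indexing facts for wall_ys[0] / wall_ys[-1]
theorem pyGet?_zero_of_ne_nil {l : List Int} (h : 0 < l.length) :
    PySem.List.pyGet? l 0 = some (l[0]'h) := by
  unfold PySem.List.pyGet? PySem.List.pyIdx?
  rw [if_pos (by omega), if_pos (by exact_mod_cast h)]
  simp

theorem pyGet?_neg_one_of_ne_nil {l : List Int} (h : 0 < l.length) :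
    PySem.List.pyGet? l (-1) = some (l[l.length - 1]'(by omega)) := by
  unfold PySem.List.pyGet? PySem.List.pyIdx?
  rw [if_neg (by omega), if_pos (by omega)]
  rw [Option.bind_some, List.getElem?_eq_getElem (by omega)]
  congr 1

-- the whole equality, stated on the items list L of the dict
theorem pvCore (L : List ((Int × Int) × String)) (hne : ∃ p ∈ L, p.2 = "#") :
    (match PySem.List.min? (PySem.Set.ofList ((L.filter (fun p : (Int × Int) × String => p.2 == "#")).map (fun p : (Int × Int) × String => p.1.2))) (fun y => y),
           PySem.List.max? (PySem.Set.ofList ((L.filter (fun p : (Int × Int) × String => p.2 == "#")).map (fun p : (Int × Int) × String => p.1.2))) (fun y => y) with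
     | some miny, some maxy =>
         L.foldl (fun reached (p : (Int × Int) × String) =>
           if (miny ≤ p.1.2 && p.1.2 ≤ maxy) && (p.2 == "~" || p.2 == "|" || p.2 == "+")
           then reached + 1 else reached) (0 : Int)
     | _, _ => 0)
    = (match PySem.List.pyGet? (PySem.List.sorted (PySem.Set.ofList ((L.filter (fun p : (Int × Int) × String => p.2 == "#")).map (fun p : (Int × Int) × String => p.1.2))) (fun y => y)) 0 with
       | none => 0
       | some miny =>
         match PySem.List.pyGet? (PySem.List.sorted (PySem.Set.ofList ((L.filter (fun p : (Int × Int) × String => p.2 == "#")).map (fun p : (Int × Int) × String => p.1.2))) (fun y => y)) (-1) with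
         | none => 0
         | some maxy =>
           pvUpper (PySem.List.sorted ((L.filter (fun p : (Int × Int) × String => p.2 == "~" || p.2 == "|" || p.2 == "+")).map (fun p : (Int × Int) × String => p.1.2)) (fun y => y)) maxy
           - pvLower (PySem.List.sorted ((L.filter (fun p : (Int × Int) × String => p.2 == "~" || p.2 == "|" || p.2 == "+")).map (fun p : (Int × Int) × String => p.1.2)) (fun y => y)) miny) := by
  set S : PySem.Set Int := PySem.Set.ofList ((L.filter (fun p : (Int × Int) × String => p.2 == "#")).map (fun p : (Int × Int) × String => p.1.2)) with hS
  set sW : List Int := PySem.List.sorted S (fun y => y) with hsW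
  set waterL : List Int := (L.filter (fun p : (Int × Int) × String => p.2 == "~" || p.2 == "|" || p.2 == "+")).map (fun p : (Int × Int) × String => p.1.2) with hwaterL
  set water : List Int := PySem.List.sorted waterL (fun y => y) with hwater
  -- the wall set is nonempty
  obtain ⟨p, hpL, hp2⟩ := hne
  have hSmem : p.1.2 ∈ S := by
    rw [hS, PySem.Set.mem_ofList]
    exact List.mem_map.2 ⟨p, List.mem_filter.2 ⟨hpL, by simp [hp2]⟩, rfl⟩
  have hSne : (S : List Int) ≠ [] := List.ne_nil_of_mem hSmem
  have hsWne : sW ≠ [] := by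
    rw [hsW]; exact fun h => hSne ((PySem.List.sorted_eq_nil_iff _ _ _).1 h)
  have hlen : 0 < sW.length := List.length_pos_iff.2 hsWne
  -- min and max of the wall set exist
  obtain ⟨m, hm⟩ : ∃ m, PySem.List.min? (S : List Int) (fun y => y) = some m := by
    cases h : PySem.List.min? (S : List Int) (fun y => y) with
    | none => exact absurd ((PySem.List.min?_eq_none_iff _ _).1 h) hSne
    | some m => exact ⟨m, rfl⟩
  obtain ⟨M, hM⟩ : ∃ M, PySem.List.max? (S : List Int) (fun y => y) = some M := by
    cases h : PySem.List.max? (S : List Int) (fun y => y) with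
    | none => exact absurd ((PySem.List.max?_eq_none_iff _ _).1 h) hSne
    | some M => exact ⟨M, rfl⟩
  -- min = first of the sorted walls, max = last of the sorted walls
  have hm0 : m = sW[0]'hlen := by
    have hmem0 : sW[0]'hlen ∈ (S : List Int) := by
      rw [← PySem.List.mem_sorted (S : List Int) (fun y => y) false, ← hsW]
      exact List.getElem_mem hlen
    obtain ⟨hd, tl, hcons⟩ := List.exists_cons_of_ne_nil hsWne
    have hhd : sW[0]'hlen = hd := by simp [hcons]
    have h1 : hd ≤ m := PySem.List.key_head_sorted_le (S : List Int) (fun y => y) (hsW ▸ hcons) m (PySem.List.min?_mem hm)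
    have h2 : m ≤ sW[0]'hlen := PySem.List.min?_isMin hm _ hmem0
    exact le_antisymm h2 (hhd ▸ h1)
  have hM0 : M = sW[sW.length - 1]'(by omega) := by
    have hmemM : M ∈ (S : List Int) := PySem.List.max?_mem hM
    have hMin : M ∈ sW := by
      rw [hsW, PySem.List.mem_sorted]; exact hmemM
    obtain ⟨i, hi, hIe⟩ := List.mem_iff_getElem.1 hMin
    have hmono := PySem.List.sorted_id_getElem_mono (S : List Int) (p := i) (q := sW.length - 1)
      (by omega) (by rw [← hsW]; omega)
    have hmono' : sW[i]'hi ≤ sW[sW.length - 1]'(by omega) := hmono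
    have hmemL : sW[sW.length - 1]'(by omega) ∈ (S : List Int) := by
      rw [← PySem.List.mem_sorted (S : List Int) (fun y => y) false, ← hsW]
      exact List.getElem_mem (by omega)
    have h2 : sW[sW.length - 1]'(by omega) ≤ M := PySem.List.max?_isMax hM _ hmemL
    exact le_antisymm (hIe ▸ hmono') h2
  have hmM : sW[0]'hlen ≤ sW[sW.length - 1]'(by omega) := by
    have := PySem.List.sorted_id_getElem_mono (S : List Int) (p := 0) (q := sW.length - 1)
      (by omega) (by rw [← hsW]; omega)
    exact this
  -- reduce both matches
  rw [hm, hM, pyGet?_zero_of_ne_nil hlen, pyGet?_neg_one_of_ne_nil hlen, hm0, hM0]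
  -- B side: the two binary searches are the two ranks
  have hpermw : water.Perm waterL := by
    rw [hwater]; exact PySem.List.sorted_perm waterL (fun y => y) false
  have hpw : water.Pairwise (· ≤ ·) := by
    have := PySem.List.sorted_pairwise waterL (fun y => y)
    rw [← hwater] at this
    exact this
  simp only []
  unfold pvUpper pvLower
  rw [pvUpperLoop_eq water _ water.length 0 _ hpw (le_refl 0)
        (by exact_mod_cast le_refl _) (by omega) (by exact_mod_cast Nat.zero_le _)
        (by exact_mod_cast List.countP_le_length),
      pvLowerLoop_eq water _ water.length 0 _ hpw (le_refl 0)
        (by exact_mod_cast le_refl _) (by omega) (by exact_mod_cast Nat.zero_le _)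
        (by exact_mod_cast List.countP_le_length)]
  -- A side: the counting loop is a countP
  rw [PySem.List.foldl_count_if, zero_add]
  -- put every count on the unsorted water list and split the ≤ count at the lower end
  rw [List.Perm.countP_eq _ hpermw, List.Perm.countP_eq _ hpermw,
      countP_range_split waterL _ _ hmM]
  -- the in-range water count over waterL is exactly A's counted predicate over L
  have hcnt : waterL.countP (fun y => decide (sW[0]'hlen ≤ y) && decide (y ≤ sW[sW.length - 1]'(by omega)))
      = L.countP (fun p => (decide (sW[0]'hlen ≤ p.1.2) && decide (p.1.2 ≤ sW[sW.length - 1]'(by omega)))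
          && (p.2 == "~" || p.2 == "|" || p.2 == "+")) := by
    rw [hwaterL, List.countP_map, List.countP_filter]
    rfl
  rw [hcnt]
  push_cast
  ring


-- ===== VERDICT (by name: the statement is the Claim_ definition above) =====
theorem count_reached_spec : Claim_equal_count_reached := by
  intro cells _ hpre
  unfold Spec_count_reached count_reached count_reached_alt
  refine pvCore _ ?_
  unfold Pre_count_reached at hpre
  simp only [PySem.Dict.values, List.mem_map] at hpre
  obtain ⟨p, hp, hp2⟩ := hpre
  exact ⟨p, hp, hp2⟩
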